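-- pv_equiv track=rewrite | github.com/chiginskiy/Network-mapper | app.py | guess_device
-- ===== SOURCE A (Python) =====
-- from typing import Dict, List, Optional, Tuple
--
-- def guess_device(hostname: str, vendor: str, ip: str, gateway_ips: List[str]) -> Tuple[str, str]:
--     hn = (hostname or "").lower()
--     vd = (vendor or "").lower()
--
--     if ip in gateway_ips:
--         return "🔌 Шлюз / роутер", "gateway"
--
--     if any(x in vd for x in ["tp-link", "d-link", "asus", "mikrotik", "cisco", "ubiquiti", "huawei"]):
--         return "🔌 Сетевое оборудование", "network"
--
--     if any(x in vd for x in ["hp", "brother", "epson", "canon", "kyocera", "xerox", "lexmark"]):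
--         return "🖨️ Принтер", "printer"
--
--     if any(x in hn for x in ["iphone", "ipad", "macbook", "imac", "apple-tv"]):
--         return "🍎 Apple устройство", "apple"
--
--     if "apple" in vd:
--         return "🍎 Apple устройство", "apple"
--
--     if any(x in hn for x in ["yandex", "alice", "yndx", "станция", "station"]):
--         return "🎙️ Яндекс.Станция", "yandex"
--
--     if any(x in hn for x in ["sber", "salute", "салют"]):
--         return "📺 Sber устройство", "sber"
--
--     if "tv" in hn or any(x in vd for x in ["lg", "samsung", "sony", "philips", "tcl", "hisense", "shiyuan"]):
--         return "📺 Телевизор / медиаприставка", "tv"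
--
--     if any(x in hn for x in ["pc", "desktop", "laptop", "notebook"]) or any(
--         x in vd for x in ["lenovo", "dell", "asus", "acer", "msi", "intel"]
--     ):
--         return "💻 Компьютер / ноутбук", "computer"
--
--     if any(x in hn for x in ["phone", "mobile", "android"]):
--         return "📱 Телефон", "phone"
--
--     return "❓ Неизвестное устройство", "unknown"
-- ===== SOURCE B (Python) =====
-- # Different algorithm: instead of testing every keyword against the fields,
-- # enumerate the substrings (windows of length <= 8) of the two fields once and
-- # look each up in a keyword -> (priority, result) hash index built from the
-- # rules; the hit with the smallest priority wins.  Priorities reproduce A's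
-- # branch order; duplicate keywords ("asus") keep their earliest priority.
--
-- _HN_KW = {}
-- _VD_KW = {}
--
-- def _load(table, prio, keywords, result):
--     for k in keywords:
--         table.setdefault(k, (prio, result))
--
-- _load(_VD_KW, 0, ["tp-link", "d-link", "asus", "mikrotik", "cisco", "ubiquiti", "huawei"],
--       ("🔌 Сетевое оборудование", "network"))
-- _load(_VD_KW, 1, ["hp", "brother", "epson", "canon", "kyocera", "xerox", "lexmark"],
--       ("🖨️ Принтер", "printer"))
-- _load(_HN_KW, 2, ["iphone", "ipad", "macbook", "imac", "apple-tv"],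
--       ("🍎 Apple устройство", "apple"))
-- _load(_VD_KW, 3, ["apple"],
--       ("🍎 Apple устройство", "apple"))
-- _load(_HN_KW, 4, ["yandex", "alice", "yndx", "станция", "station"],
--       ("🎙️ Яндекс.Станция", "yandex"))
-- _load(_HN_KW, 5, ["sber", "salute", "салют"],
--       ("📺 Sber устройство", "sber"))
-- _load(_HN_KW, 6, ["tv"],
--       ("📺 Телевизор / медиаприставка", "tv"))
-- _load(_VD_KW, 7, ["lg", "samsung", "sony", "philips", "tcl", "hisense", "shiyuan"],
--       ("📺 Телевизор / медиаприставка", "tv"))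
-- _load(_HN_KW, 8, ["pc", "desktop", "laptop", "notebook"],
--       ("💻 Компьютер / ноутбук", "computer"))
-- _load(_VD_KW, 9, ["lenovo", "dell", "asus", "acer", "msi", "intel"],
--       ("💻 Компьютер / ноутбук", "computer"))
-- _load(_HN_KW, 10, ["phone", "mobile", "android"],
--       ("📱 Телефон", "phone"))
--
-- _MAXK = 8  # length of the longest keyword ("apple-tv")
--
-- def _scan(field, table, best):
--     # slide over the field, probing every window of length 1.._MAXK
--     n = len(field)
--     for i in range(n):
--         for L in range(1, min(_MAXK, n - i) + 1):
--             hit = table.get(field[i:i + L])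
--             if hit is not None and (best is None or hit[0] < best[0]):
--                 best = hit
--     return best
--
-- def guess_device(hostname, vendor, ip, gateway_ips):
--     if ip in gateway_ips:
--         return "🔌 Шлюз / роутер", "gateway"
--     best = _scan((hostname or "").lower(), _HN_KW, None)
--     best = _scan((vendor or "").lower(), _VD_KW, best)
--     return best[1] if best is not None else ("❓ Неизвестное устройство", "unknown")
-- ===== Notes on version B (the rewrite author's own statement) =====
-- stated objective: alternative
-- what changed: Instead of testing every keyword against the fields (A's rule cascade of any(k in field) checks), B slides over each field once, looks every window of length 1..8 up in a keyword->(priority,result) hash index built from the rules, and returns the hit with the smallest priority (priorities reproduce A's branch order, first match = minimum).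
import Mathlib
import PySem

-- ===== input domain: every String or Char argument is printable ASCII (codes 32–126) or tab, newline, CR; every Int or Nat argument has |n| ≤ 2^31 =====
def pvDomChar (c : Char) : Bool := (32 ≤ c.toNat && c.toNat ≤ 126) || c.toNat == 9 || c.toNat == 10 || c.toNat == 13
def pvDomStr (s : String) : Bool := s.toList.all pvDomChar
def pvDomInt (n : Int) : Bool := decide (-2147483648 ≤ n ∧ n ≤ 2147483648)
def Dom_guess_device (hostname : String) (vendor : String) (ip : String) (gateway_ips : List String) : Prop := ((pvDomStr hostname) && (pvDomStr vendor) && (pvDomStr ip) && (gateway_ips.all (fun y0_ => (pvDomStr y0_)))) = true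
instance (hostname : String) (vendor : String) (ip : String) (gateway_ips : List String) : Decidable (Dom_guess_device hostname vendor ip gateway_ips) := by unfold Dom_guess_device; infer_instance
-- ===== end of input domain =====

-- B replaces A's keyword-by-keyword rule cascade with a single slide over each field,
-- looking every window of length 1..8 up in a keyword -> (priority, result) index and
-- keeping the hit with the smallest priority (objective: alternative, same cost).

-- ===== PORT A =====
def guess_device (hostname : String) (vendor : String) (ip : String) (gateway_ips : List String) : String × String :=
  let hn := PySem.Str.lower hostname
  let vd := PySem.Str.lower vendor
  if gateway_ips.contains ip then ("🔌 Шлюз / роутер", "gateway")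
  else if ["tp-link", "d-link", "asus", "mikrotik", "cisco", "ubiquiti", "huawei"].any (fun x => PySem.Str.isIn x vd) then ("🔌 Сетевое оборудование", "network")
  else if ["hp", "brother", "epson", "canon", "kyocera", "xerox", "lexmark"].any (fun x => PySem.Str.isIn x vd) then ("🖨️ Принтер", "printer")
  else if ["iphone", "ipad", "macbook", "imac", "apple-tv"].any (fun x => PySem.Str.isIn x hn) then ("🍎 Apple устройство", "apple")
  else if PySem.Str.isIn "apple" vd then ("🍎 Apple устройство", "apple")
  else if ["yandex", "alice", "yndx", "станция", "station"].any (fun x => PySem.Str.isIn x hn) then ("🎙️ Яндекс.Станция", "yandex")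
  else if ["sber", "salute", "салют"].any (fun x => PySem.Str.isIn x hn) then ("📺 Sber устройство", "sber")
  else if (PySem.Str.isIn "tv" hn || ["lg", "samsung", "sony", "philips", "tcl", "hisense", "shiyuan"].any (fun x => PySem.Str.isIn x vd)) then ("📺 Телевизор / медиаприставка", "tv")
  else if (["pc", "desktop", "laptop", "notebook"].any (fun x => PySem.Str.isIn x hn) || ["lenovo", "dell", "asus", "acer", "msi", "intel"].any (fun x => PySem.Str.isIn x vd)) then ("💻 Компьютер / ноутбук", "computer")
  else if ["phone", "mobile", "android"].any (fun x => PySem.Str.isIn x hn) then ("📱 Телефон", "phone")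
  else ("❓ Неизвестное устройство", "unknown")

-- ===== PORT B =====
-- The two keyword indexes, written out as the literal dicts Source B's setdefault loop
-- builds ("asus" keeps its earliest entry, priority 0, so it appears only once).
def pvHnTab : PySem.Dict String (Int × String × String) := PySem.Dict.mk
  [ ("iphone", (2, "🍎 Apple устройство", "apple")), ("ipad", (2, "🍎 Apple устройство", "apple")),
    ("macbook", (2, "🍎 Apple устройство", "apple")), ("imac", (2, "🍎 Apple устройство", "apple")),
    ("apple-tv", (2, "🍎 Apple устройство", "apple")),
    ("yandex", (4, "🎙️ Яндекс.Станция", "yandex")), ("alice", (4, "🎙️ Яндекс.Станция", "yandex")),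
    ("yndx", (4, "🎙️ Яндекс.Станция", "yandex")), ("станция", (4, "🎙️ Яндекс.Станция", "yandex")),
    ("station", (4, "🎙️ Яндекс.Станция", "yandex")),
    ("sber", (5, "📺 Sber устройство", "sber")), ("salute", (5, "📺 Sber устройство", "sber")),
    ("салют", (5, "📺 Sber устройство", "sber")),
    ("tv", (6, "📺 Телевизор / медиаприставка", "tv")),
    ("pc", (8, "💻 Компьютер / ноутбук", "computer")), ("desktop", (8, "💻 Компьютер / ноутбук", "computer")),
    ("laptop", (8, "💻 Компьютер / ноутбук", "computer")), ("notebook", (8, "💻 Компьютер / ноутбук", "computer")),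
    ("phone", (10, "📱 Телефон", "phone")), ("mobile", (10, "📱 Телефон", "phone")),
    ("android", (10, "📱 Телефон", "phone")) ]

def pvVdTab : PySem.Dict String (Int × String × String) := PySem.Dict.mk
  [ ("tp-link", (0, "🔌 Сетевое оборудование", "network")), ("d-link", (0, "🔌 Сетевое оборудование", "network")),
    ("asus", (0, "🔌 Сетевое оборудование", "network")), ("mikrotik", (0, "🔌 Сетевое оборудование", "network")),
    ("cisco", (0, "🔌 Сетевое оборудование", "network")), ("ubiquiti", (0, "🔌 Сетевое оборудование", "network")),
    ("huawei", (0, "🔌 Сетевое оборудование", "network")),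
    ("hp", (1, "🖨️ Принтер", "printer")), ("brother", (1, "🖨️ Принтер", "printer")),
    ("epson", (1, "🖨️ Принтер", "printer")), ("canon", (1, "🖨️ Принтер", "printer")),
    ("kyocera", (1, "🖨️ Принтер", "printer")), ("xerox", (1, "🖨️ Принтер", "printer")),
    ("lexmark", (1, "🖨️ Принтер", "printer")),
    ("apple", (3, "🍎 Apple устройство", "apple")),
    ("lg", (7, "📺 Телевизор / медиаприставка", "tv")), ("samsung", (7, "📺 Телевизор / медиаприставка", "tv")),
    ("sony", (7, "📺 Телевизор / медиаприставка", "tv")), ("philips", (7, "📺 Телевизор / медиаприставка", "tv")),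
    ("tcl", (7, "📺 Телевизор / медиаприставка", "tv")), ("hisense", (7, "📺 Телевизор / медиаприставка", "tv")),
    ("shiyuan", (7, "📺 Телевизор / медиаприставка", "tv")),
    ("lenovo", (9, "💻 Компьютер / ноутбук", "computer")), ("dell", (9, "💻 Компьютер / ноутбук", "computer")),
    ("acer", (9, "💻 Компьютер / ноутбук", "computer")), ("msi", (9, "💻 Компьютер / ноутбук", "computer")),
    ("intel", (9, "💻 Компьютер / ноутбук", "computer")) ]

-- best-hit update: keep the hit with the strictly smaller priority
def pvUpd (b : Option (Int × String × String)) (hit? : Option (Int × String × String)) : Option (Int × String × String) :=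
  match hit? with
  | none => b
  | some hit =>
    match b with
    | none => some hit
    | some bb => if hit.1 < bb.1 then some hit else some bb

-- inner loop: probe every window field[i:i+L], L = 1 .. min(8, n-i)
-- (the slice field[i:i+L] with 0 <= i, 0 <= L is exactly (drop i).take L, cf. PySem.List.slice_natCast_add)
def pvProbe (tab : PySem.Dict String (Int × String × String)) (f : List Char) (i : Nat) (best : Option (Int × String × String)) : Option (Int × String × String) :=
  (List.range (min 8 (f.length - i))).foldl (fun b L => pvUpd b (tab.get? (String.ofList ((f.drop i).take (L + 1))))) best

-- outer loop: for i in range(n)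
def pvScan (tab : PySem.Dict String (Int × String × String)) (f : List Char) (best : Option (Int × String × String)) : Option (Int × String × String) :=
  (List.range f.length).foldl (fun b i => pvProbe tab f i b) best

def guess_device_alt (hostname : String) (vendor : String) (ip : String) (gateway_ips : List String) : String × String :=
  if gateway_ips.contains ip then ("🔌 Шлюз / роутер", "gateway")
  else
    match pvScan pvVdTab (PySem.Str.lower vendor).toList (pvScan pvHnTab (PySem.Str.lower hostname).toList none) with
    | some (_, res) => res
    | none => ("❓ Неизвестное устройство", "unknown")

-- ===== PRECONDITION & SPEC =====
def Spec_guess_device (hostname : String) (vendor : String) (ip : String) (gateway_ips : List String) (out : String × String) : Prop := out = guess_device_alt hostname vendor ip gateway_ips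
instance (hostname : String) (vendor : String) (ip : String) (gateway_ips : List String) (out : String × String) : Decidable (Spec_guess_device hostname vendor ip gateway_ips out) := by unfold Spec_guess_device; infer_instance

-- ===== CLAIM (what is proved, stated in full; the proofs are below) =====
def Claim_equal_guess_device : Prop := ∀ (hostname : String) (vendor : String) (ip : String) (gateway_ips : List String), Dom_guess_device hostname vendor ip gateway_ips → Spec_guess_device hostname vendor ip gateway_ips (guess_device hostname vendor ip gateway_ips)


-- ===== LEMMAS AND PROOFS =====

-- the rule results, indexed by priority (= A's branch order)
def pvRes (p : Int) : String × String :=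
  if p = 0 then ("🔌 Сетевое оборудование", "network")
  else if p = 1 then ("🖨️ Принтер", "printer")
  else if p = 2 ∨ p = 3 then ("🍎 Apple устройство", "apple")
  else if p = 4 then ("🎙️ Яндекс.Станция", "yandex")
  else if p = 5 then ("📺 Sber устройство", "sber")
  else if p = 6 ∨ p = 7 then ("📺 Телевизор / медиаприставка", "tv")
  else if p = 8 ∨ p = 9 then ("💻 Компьютер / ноутбук", "computer")
  else ("📱 Телефон", "phone")

def pvCano (p : Int) : Int × String × String := (p, pvRes p)

-- the stream of index probes pvScan makes over a field
def pvVisits (tab : PySem.Dict String (Int × String × String)) (f : List Char) : List (Option (Int × String × String)) :=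
  f.tails.flatMap (fun t => (List.range (min 8 t.length)).map (fun L => tab.get? (String.ofList (t.take (L + 1)))))

def pvHits (tab : PySem.Dict String (Int × String × String)) (f : List Char) : List (Int × String × String) :=
  (pvVisits tab f).reduceOption

def pvPmin (b : Option Int) (p : Int) : Option Int :=
  match b with
  | none => some p
  | some q => if p < q then some p else some q

theorem pv_foldl_flatMap {α β γ : Type} (l : List α) (g : α → List β) (F : γ → β → γ) (b : γ) :
    (l.flatMap g).foldl F b = l.foldl (fun b x => (g x).foldl F b) b := by
  induction l generalizing b with
  | nil => rfl
  | cons x t ih => simp [List.flatMap_cons, List.foldl_append, ih]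

-- the probe stream written the way the port makes it (indices instead of tails)
def pvVisitsD (tab : PySem.Dict String (Int × String × String)) (f : List Char) : List (Option (Int × String × String)) :=
  (List.range f.length).flatMap
    (fun i => (List.range (min 8 (f.length - i))).map (fun L => tab.get? (String.ofList ((f.drop i).take (L + 1)))))

theorem pv_visitsD_eq (tab : PySem.Dict String (Int × String × String)) (f : List Char) :
    pvVisitsD tab f = pvVisits tab f := by
  induction f with
  | nil => rfl
  | cons c rest ih =>
    have h1 : pvVisitsD tab (c :: rest)
        = ((List.range (min 8 (c :: rest).length)).map
            (fun L => tab.get? (String.ofList ((c :: rest).take (L + 1))))) ++ pvVisitsD tab rest := by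
      simp only [pvVisitsD, List.length_cons, List.range_succ_eq_map, List.flatMap_cons,
        List.flatMap_map, List.drop_zero, List.drop_succ_cons, Nat.succ_sub_succ, Nat.sub_zero]
    conv_rhs => rw [pvVisits, List.tails_cons, List.flatMap_cons]
    rw [h1, ih, pvVisits]

theorem pv_scan_eq (tab : PySem.Dict String (Int × String × String)) (f : List Char) (best : Option (Int × String × String)) :
    pvScan tab f best = (pvVisits tab f).foldl pvUpd best := by
  rw [← pv_visitsD_eq]
  simp only [pvScan, pvVisitsD, pv_foldl_flatMap, List.foldl_map, pvProbe]

theorem pv_foldl_reduce (l : List (Option (Int × String × String))) (b : Option (Int × String × String)) :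
    l.foldl pvUpd b = l.reduceOption.foldl (fun b e => pvUpd b (some e)) b := by
  induction l generalizing b with
  | nil => rfl
  | cons o t ih =>
    cases o with
    | none => simpa [pvUpd] using ih b
    | some a => simp [ih]

theorem pv_scan_eq_hits (tab : PySem.Dict String (Int × String × String)) (f : List Char) (best : Option (Int × String × String)) :
    pvScan tab f best = (pvHits tab f).foldl (fun b e => pvUpd b (some e)) best := by
  rw [pv_scan_eq, pv_foldl_reduce]; rfl

theorem pv_foldl_cano (l : List (Int × String × String)) (bp : Option Int)
    (hl : ∀ e ∈ l, e = pvCano e.1) :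
    l.foldl (fun b e => pvUpd b (some e)) (bp.map pvCano)
      = ((l.map Prod.fst).foldl pvPmin bp).map pvCano := by
  induction l generalizing bp with
  | nil => rfl
  | cons e t ih =>
    obtain ⟨p, res⟩ := e
    have he := hl (p, res) (by simp)
    have hres : res = pvRes p := congrArg Prod.snd he
    subst hres
    have ht : ∀ x ∈ t, x = pvCano x.1 := fun x hx => hl x (by simp [hx])
    simp only [List.foldl_cons, List.map_cons]
    have hstep : pvUpd (bp.map pvCano) (some (p, pvRes p)) = (pvPmin bp p).map pvCano := by
      cases bp with
      | none => rfl
      | some q =>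
        by_cases h : p < q
        · rw [show pvUpd (Option.map pvCano (some q)) (some (p, pvRes p)) = some (p, pvRes p) from if_pos h,
              show pvPmin (some q) p = some p from if_pos h]
          rfl
        · rw [show pvUpd (Option.map pvCano (some q)) (some (p, pvRes p)) = some (pvCano q) from if_neg h,
              show pvPmin (some q) p = some q from if_neg h]
          rfl
    rw [hstep, ih _ ht]

theorem pv_foldl_cano_none (l : List (Int × String × String))
    (hl : ∀ e ∈ l, e = pvCano e.1) :
    l.foldl (fun b e => pvUpd b (some e)) none
      = ((l.map Prod.fst).foldl pvPmin none).map pvCano :=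
  pv_foldl_cano l none hl

theorem pv_foldl_pmin_some (l : List Int) (a : Int) :
    l.foldl pvPmin (some a) = some (l.foldl min a) := by
  induction l generalizing a with
  | nil => rfl
  | cons p t ih =>
    simp only [List.foldl_cons]
    have : pvPmin (some a) p = some (min a p) := by
      simp only [pvPmin, Int.min_def]
      split_ifs <;> first | rfl | (congr 1; omega)
    rw [this, ih]

theorem pv_foldl_pmin_none (l : List Int) : l.foldl pvPmin none = l.min? := by
  cases l with
  | nil => rfl
  | cons a t =>
    simp only [List.foldl_cons]
    rw [show pvPmin none a = some a from rfl, pv_foldl_pmin_some]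
    rfl

theorem pv_mem_hits (tab : PySem.Dict String (Int × String × String)) (f : List Char) (e : Int × String × String) :
    e ∈ pvHits tab f ↔
      ∃ w : List Char, tab.get? (String.ofList w) = some e ∧ w <:+: f ∧ 0 < w.length ∧ w.length ≤ 8 := by
  unfold pvHits pvVisits
  rw [List.reduceOption_mem_iff]
  simp only [List.mem_flatMap, List.mem_map, List.mem_range, List.mem_tails]
  constructor
  · rintro ⟨t, hts, L, hL, hget⟩
    have hlen : (t.take (L + 1)).length = L + 1 := by
      rw [List.length_take]; omega
    exact ⟨t.take (L + 1), hget,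
      ((List.take_prefix _ _).isInfix).trans hts.isInfix, by omega, by omega⟩
  · rintro ⟨w, hget, hinf, hpos, hle⟩
    obtain ⟨t, hpre, hsuf⟩ := List.infix_iff_prefix_suffix.mp hinf
    have hlt : w.length ≤ t.length := hpre.length_le
    refine ⟨t, hsuf, w.length - 1, by omega, ?_⟩
    have htake : t.take (w.length - 1 + 1) = w := by
      have h1 : w.length - 1 + 1 = w.length := by omega
      rw [h1, ← List.prefix_iff_eq_take.mp hpre]
    rw [htake]; exact hget

theorem pv_hits_cano (tab : PySem.Dict String (Int × String × String))
    (htab : ∀ p ∈ tab.items, p.2 = pvCano p.2.1) (f : List Char) :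
    ∀ e ∈ pvHits tab f, e = pvCano e.1 := by
  intro e he
  obtain ⟨w, hget, -⟩ := (pv_mem_hits tab f e).mp he
  exact htab _ (PySem.Dict.mem_items_of_get?_eq_some _ hget)

set_option maxHeartbeats 2000000 in
theorem pv_hn_cano : ∀ p ∈ pvHnTab.items, p.2 = pvCano p.2.1 := by decide

set_option maxHeartbeats 2000000 in
theorem pv_vd_cano : ∀ p ∈ pvVdTab.items, p.2 = pvCano p.2.1 := by decide

theorem pv_mem_prios (tab : PySem.Dict String (Int × String × String))
    (hnd : tab.keys.Nodup)
    (hklen : ∀ kv ∈ tab.items, 0 < kv.1.toList.length ∧ kv.1.toList.length ≤ 8)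
    (f : List Char) (q : Int) :
    q ∈ (pvHits tab f).map Prod.fst ↔ ∃ kv ∈ tab.items, kv.2.1 = q ∧ kv.1.toList <:+: f := by
  rw [List.mem_map]
  constructor
  · rintro ⟨e, he, rfl⟩
    obtain ⟨w, hget, hinf, -, -⟩ := (pv_mem_hits tab f e).mp he
    refine ⟨(String.ofList w, e), PySem.Dict.mem_items_of_get?_eq_some _ hget, rfl, ?_⟩
    simpa using hinf
  · rintro ⟨⟨k, e⟩, hmem, rfl, hinf⟩
    refine ⟨e, (pv_mem_hits tab f e).mpr ⟨k.toList, ?_, hinf, (hklen _ hmem).1, (hklen _ hmem).2⟩, rfl⟩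
    rw [String.ofList_toList]
    exact PySem.Dict.get?_of_mem_items _ hmem hnd


theorem pv_hn_nodup : pvHnTab.keys.Nodup := by decide
theorem pv_vd_nodup : pvVdTab.keys.Nodup := by decide
theorem pv_hn_klen : ∀ kv ∈ pvHnTab.items, 0 < kv.1.toList.length ∧ kv.1.toList.length ≤ 8 := by decide
theorem pv_vd_klen : ∀ kv ∈ pvVdTab.items, 0 < kv.1.toList.length ∧ kv.1.toList.length ≤ 8 := by decide

set_option maxHeartbeats 1000000 in
theorem pv_mem_priosH (f : List Char) (q : Int) :
    q ∈ (pvHits pvHnTab f).map Prod.fst ↔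
      (q = 2 ∧ ("iphone".toList <:+: f ∨ "ipad".toList <:+: f ∨ "macbook".toList <:+: f ∨ "imac".toList <:+: f ∨ "apple-tv".toList <:+: f)) ∨
      (q = 4 ∧ ("yandex".toList <:+: f ∨ "alice".toList <:+: f ∨ "yndx".toList <:+: f ∨ "станция".toList <:+: f ∨ "station".toList <:+: f)) ∨
      (q = 5 ∧ ("sber".toList <:+: f ∨ "salute".toList <:+: f ∨ "салют".toList <:+: f)) ∨
      (q = 6 ∧ ("tv".toList <:+: f)) ∨
      (q = 8 ∧ ("pc".toList <:+: f ∨ "desktop".toList <:+: f ∨ "laptop".toList <:+: f ∨ "notebook".toList <:+: f)) ∨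
      (q = 10 ∧ ("phone".toList <:+: f ∨ "mobile".toList <:+: f ∨ "android".toList <:+: f)) := by
  rw [pv_mem_prios pvHnTab pv_hn_nodup pv_hn_klen f q]
  constructor
  · rintro ⟨kv, hkv, hq, hw⟩
    simp only [pvHnTab, List.mem_cons, List.not_mem_nil, or_false] at hkv
    rcases hkv with rfl|rfl|rfl|rfl|rfl|rfl|rfl|rfl|rfl|rfl|rfl|rfl|rfl|rfl|rfl|rfl|rfl|rfl|rfl|rfl|rfl
    · exact Or.inl (⟨hq.symm, Or.inl (hw)⟩)
    · exact Or.inl (⟨hq.symm, Or.inr (Or.inl (hw))⟩)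
    · exact Or.inl (⟨hq.symm, Or.inr (Or.inr (Or.inl (hw)))⟩)
    · exact Or.inl (⟨hq.symm, Or.inr (Or.inr (Or.inr (Or.inl (hw))))⟩)
    · exact Or.inl (⟨hq.symm, Or.inr (Or.inr (Or.inr (Or.inr (hw))))⟩)
    · exact Or.inr (Or.inl (⟨hq.symm, Or.inl (hw)⟩))
    · exact Or.inr (Or.inl (⟨hq.symm, Or.inr (Or.inl (hw))⟩))
    · exact Or.inr (Or.inl (⟨hq.symm, Or.inr (Or.inr (Or.inl (hw)))⟩))
    · exact Or.inr (Or.inl (⟨hq.symm, Or.inr (Or.inr (Or.inr (Or.inl (hw))))⟩))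
    · exact Or.inr (Or.inl (⟨hq.symm, Or.inr (Or.inr (Or.inr (Or.inr (hw))))⟩))
    · exact Or.inr (Or.inr (Or.inl (⟨hq.symm, Or.inl (hw)⟩)))
    · exact Or.inr (Or.inr (Or.inl (⟨hq.symm, Or.inr (Or.inl (hw))⟩)))
    · exact Or.inr (Or.inr (Or.inl (⟨hq.symm, Or.inr (Or.inr (hw))⟩)))
    · exact Or.inr (Or.inr (Or.inr (Or.inl (⟨hq.symm, hw⟩))))
    · exact Or.inr (Or.inr (Or.inr (Or.inr (Or.inl (⟨hq.symm, Or.inl (hw)⟩)))))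
    · exact Or.inr (Or.inr (Or.inr (Or.inr (Or.inl (⟨hq.symm, Or.inr (Or.inl (hw))⟩)))))
    · exact Or.inr (Or.inr (Or.inr (Or.inr (Or.inl (⟨hq.symm, Or.inr (Or.inr (Or.inl (hw)))⟩)))))
    · exact Or.inr (Or.inr (Or.inr (Or.inr (Or.inl (⟨hq.symm, Or.inr (Or.inr (Or.inr (hw)))⟩)))))
    · exact Or.inr (Or.inr (Or.inr (Or.inr (Or.inr (⟨hq.symm, Or.inl (hw)⟩)))))
    · exact Or.inr (Or.inr (Or.inr (Or.inr (Or.inr (⟨hq.symm, Or.inr (Or.inl (hw))⟩)))))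
    · exact Or.inr (Or.inr (Or.inr (Or.inr (Or.inr (⟨hq.symm, Or.inr (Or.inr (hw))⟩)))))
  · rintro (⟨rfl, hw⟩|⟨rfl, hw⟩|⟨rfl, hw⟩|⟨rfl, hw⟩|⟨rfl, hw⟩|⟨rfl, hw⟩)
    · rcases hw with hw|hw|hw|hw|hw
      · exact ⟨("iphone", 2, "🍎 Apple устройство", "apple"), by simp [pvHnTab], rfl, hw⟩
      · exact ⟨("ipad", 2, "🍎 Apple устройство", "apple"), by simp [pvHnTab], rfl, hw⟩
      · exact ⟨("macbook", 2, "🍎 Apple устройство", "apple"), by simp [pvHnTab], rfl, hw⟩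
      · exact ⟨("imac", 2, "🍎 Apple устройство", "apple"), by simp [pvHnTab], rfl, hw⟩
      · exact ⟨("apple-tv", 2, "🍎 Apple устройство", "apple"), by simp [pvHnTab], rfl, hw⟩
    · rcases hw with hw|hw|hw|hw|hw
      · exact ⟨("yandex", 4, "🎙️ Яндекс.Станция", "yandex"), by simp [pvHnTab], rfl, hw⟩
      · exact ⟨("alice", 4, "🎙️ Яндекс.Станция", "yandex"), by simp [pvHnTab], rfl, hw⟩
      · exact ⟨("yndx", 4, "🎙️ Яндекс.Станция", "yandex"), by simp [pvHnTab], rfl, hw⟩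
      · exact ⟨("станция", 4, "🎙️ Яндекс.Станция", "yandex"), by simp [pvHnTab], rfl, hw⟩
      · exact ⟨("station", 4, "🎙️ Яндекс.Станция", "yandex"), by simp [pvHnTab], rfl, hw⟩
    · rcases hw with hw|hw|hw
      · exact ⟨("sber", 5, "📺 Sber устройство", "sber"), by simp [pvHnTab], rfl, hw⟩
      · exact ⟨("salute", 5, "📺 Sber устройство", "sber"), by simp [pvHnTab], rfl, hw⟩
      · exact ⟨("салют", 5, "📺 Sber устройство", "sber"), by simp [pvHnTab], rfl, hw⟩
    · exact ⟨("tv", 6, "📺 Телевизор / медиаприставка", "tv"), by simp [pvHnTab], rfl, hw⟩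
    · rcases hw with hw|hw|hw|hw
      · exact ⟨("pc", 8, "💻 Компьютер / ноутбук", "computer"), by simp [pvHnTab], rfl, hw⟩
      · exact ⟨("desktop", 8, "💻 Компьютер / ноутбук", "computer"), by simp [pvHnTab], rfl, hw⟩
      · exact ⟨("laptop", 8, "💻 Компьютер / ноутбук", "computer"), by simp [pvHnTab], rfl, hw⟩
      · exact ⟨("notebook", 8, "💻 Компьютер / ноутбук", "computer"), by simp [pvHnTab], rfl, hw⟩
    · rcases hw with hw|hw|hw
      · exact ⟨("phone", 10, "📱 Телефон", "phone"), by simp [pvHnTab], rfl, hw⟩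
      · exact ⟨("mobile", 10, "📱 Телефон", "phone"), by simp [pvHnTab], rfl, hw⟩
      · exact ⟨("android", 10, "📱 Телефон", "phone"), by simp [pvHnTab], rfl, hw⟩

set_option maxHeartbeats 1000000 in
theorem pv_mem_priosV (f : List Char) (q : Int) :
    q ∈ (pvHits pvVdTab f).map Prod.fst ↔
      (q = 0 ∧ ("tp-link".toList <:+: f ∨ "d-link".toList <:+: f ∨ "asus".toList <:+: f ∨ "mikrotik".toList <:+: f ∨ "cisco".toList <:+: f ∨ "ubiquiti".toList <:+: f ∨ "huawei".toList <:+: f)) ∨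
      (q = 1 ∧ ("hp".toList <:+: f ∨ "brother".toList <:+: f ∨ "epson".toList <:+: f ∨ "canon".toList <:+: f ∨ "kyocera".toList <:+: f ∨ "xerox".toList <:+: f ∨ "lexmark".toList <:+: f)) ∨
      (q = 3 ∧ ("apple".toList <:+: f)) ∨
      (q = 7 ∧ ("lg".toList <:+: f ∨ "samsung".toList <:+: f ∨ "sony".toList <:+: f ∨ "philips".toList <:+: f ∨ "tcl".toList <:+: f ∨ "hisense".toList <:+: f ∨ "shiyuan".toList <:+: f)) ∨
      (q = 9 ∧ ("lenovo".toList <:+: f ∨ "dell".toList <:+: f ∨ "acer".toList <:+: f ∨ "msi".toList <:+: f ∨ "intel".toList <:+: f)) := by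
  rw [pv_mem_prios pvVdTab pv_vd_nodup pv_vd_klen f q]
  constructor
  · rintro ⟨kv, hkv, hq, hw⟩
    simp only [pvVdTab, List.mem_cons, List.not_mem_nil, or_false] at hkv
    rcases hkv with rfl|rfl|rfl|rfl|rfl|rfl|rfl|rfl|rfl|rfl|rfl|rfl|rfl|rfl|rfl|rfl|rfl|rfl|rfl|rfl|rfl|rfl|rfl|rfl|rfl|rfl|rfl
    · exact Or.inl (⟨hq.symm, Or.inl (hw)⟩)
    · exact Or.inl (⟨hq.symm, Or.inr (Or.inl (hw))⟩)
    · exact Or.inl (⟨hq.symm, Or.inr (Or.inr (Or.inl (hw)))⟩)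
    · exact Or.inl (⟨hq.symm, Or.inr (Or.inr (Or.inr (Or.inl (hw))))⟩)
    · exact Or.inl (⟨hq.symm, Or.inr (Or.inr (Or.inr (Or.inr (Or.inl (hw)))))⟩)
    · exact Or.inl (⟨hq.symm, Or.inr (Or.inr (Or.inr (Or.inr (Or.inr (Or.inl (hw))))))⟩)
    · exact Or.inl (⟨hq.symm, Or.inr (Or.inr (Or.inr (Or.inr (Or.inr (Or.inr (hw))))))⟩)
    · exact Or.inr (Or.inl (⟨hq.symm, Or.inl (hw)⟩))
    · exact Or.inr (Or.inl (⟨hq.symm, Or.inr (Or.inl (hw))⟩))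
    · exact Or.inr (Or.inl (⟨hq.symm, Or.inr (Or.inr (Or.inl (hw)))⟩))
    · exact Or.inr (Or.inl (⟨hq.symm, Or.inr (Or.inr (Or.inr (Or.inl (hw))))⟩))
    · exact Or.inr (Or.inl (⟨hq.symm, Or.inr (Or.inr (Or.inr (Or.inr (Or.inl (hw)))))⟩))
    · exact Or.inr (Or.inl (⟨hq.symm, Or.inr (Or.inr (Or.inr (Or.inr (Or.inr (Or.inl (hw))))))⟩))
    · exact Or.inr (Or.inl (⟨hq.symm, Or.inr (Or.inr (Or.inr (Or.inr (Or.inr (Or.inr (hw))))))⟩))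
    · exact Or.inr (Or.inr (Or.inl (⟨hq.symm, hw⟩)))
    · exact Or.inr (Or.inr (Or.inr (Or.inl (⟨hq.symm, Or.inl (hw)⟩))))
    · exact Or.inr (Or.inr (Or.inr (Or.inl (⟨hq.symm, Or.inr (Or.inl (hw))⟩))))
    · exact Or.inr (Or.inr (Or.inr (Or.inl (⟨hq.symm, Or.inr (Or.inr (Or.inl (hw)))⟩))))
    · exact Or.inr (Or.inr (Or.inr (Or.inl (⟨hq.symm, Or.inr (Or.inr (Or.inr (Or.inl (hw))))⟩))))
    · exact Or.inr (Or.inr (Or.inr (Or.inl (⟨hq.symm, Or.inr (Or.inr (Or.inr (Or.inr (Or.inl (hw)))))⟩))))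
    · exact Or.inr (Or.inr (Or.inr (Or.inl (⟨hq.symm, Or.inr (Or.inr (Or.inr (Or.inr (Or.inr (Or.inl (hw))))))⟩))))
    · exact Or.inr (Or.inr (Or.inr (Or.inl (⟨hq.symm, Or.inr (Or.inr (Or.inr (Or.inr (Or.inr (Or.inr (hw))))))⟩))))
    · exact Or.inr (Or.inr (Or.inr (Or.inr (⟨hq.symm, Or.inl (hw)⟩))))
    · exact Or.inr (Or.inr (Or.inr (Or.inr (⟨hq.symm, Or.inr (Or.inl (hw))⟩))))
    · exact Or.inr (Or.inr (Or.inr (Or.inr (⟨hq.symm, Or.inr (Or.inr (Or.inl (hw)))⟩))))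
    · exact Or.inr (Or.inr (Or.inr (Or.inr (⟨hq.symm, Or.inr (Or.inr (Or.inr (Or.inl (hw))))⟩))))
    · exact Or.inr (Or.inr (Or.inr (Or.inr (⟨hq.symm, Or.inr (Or.inr (Or.inr (Or.inr (hw))))⟩))))
  · rintro (⟨rfl, hw⟩|⟨rfl, hw⟩|⟨rfl, hw⟩|⟨rfl, hw⟩|⟨rfl, hw⟩)
    · rcases hw with hw|hw|hw|hw|hw|hw|hw
      · exact ⟨("tp-link", 0, "🔌 Сетевое оборудование", "network"), by simp [pvVdTab], rfl, hw⟩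
      · exact ⟨("d-link", 0, "🔌 Сетевое оборудование", "network"), by simp [pvVdTab], rfl, hw⟩
      · exact ⟨("asus", 0, "🔌 Сетевое оборудование", "network"), by simp [pvVdTab], rfl, hw⟩
      · exact ⟨("mikrotik", 0, "🔌 Сетевое оборудование", "network"), by simp [pvVdTab], rfl, hw⟩
      · exact ⟨("cisco", 0, "🔌 Сетевое оборудование", "network"), by simp [pvVdTab], rfl, hw⟩
      · exact ⟨("ubiquiti", 0, "🔌 Сетевое оборудование", "network"), by simp [pvVdTab], rfl, hw⟩
      · exact ⟨("huawei", 0, "🔌 Сетевое оборудование", "network"), by simp [pvVdTab], rfl, hw⟩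
    · rcases hw with hw|hw|hw|hw|hw|hw|hw
      · exact ⟨("hp", 1, "🖨️ Принтер", "printer"), by simp [pvVdTab], rfl, hw⟩
      · exact ⟨("brother", 1, "🖨️ Принтер", "printer"), by simp [pvVdTab], rfl, hw⟩
      · exact ⟨("epson", 1, "🖨️ Принтер", "printer"), by simp [pvVdTab], rfl, hw⟩
      · exact ⟨("canon", 1, "🖨️ Принтер", "printer"), by simp [pvVdTab], rfl, hw⟩
      · exact ⟨("kyocera", 1, "🖨️ Принтер", "printer"), by simp [pvVdTab], rfl, hw⟩
      · exact ⟨("xerox", 1, "🖨️ Принтер", "printer"), by simp [pvVdTab], rfl, hw⟩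
      · exact ⟨("lexmark", 1, "🖨️ Принтер", "printer"), by simp [pvVdTab], rfl, hw⟩
    · exact ⟨("apple", 3, "🍎 Apple устройство", "apple"), by simp [pvVdTab], rfl, hw⟩
    · rcases hw with hw|hw|hw|hw|hw|hw|hw
      · exact ⟨("lg", 7, "📺 Телевизор / медиаприставка", "tv"), by simp [pvVdTab], rfl, hw⟩
      · exact ⟨("samsung", 7, "📺 Телевизор / медиаприставка", "tv"), by simp [pvVdTab], rfl, hw⟩
      · exact ⟨("sony", 7, "📺 Телевизор / медиаприставка", "tv"), by simp [pvVdTab], rfl, hw⟩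
      · exact ⟨("philips", 7, "📺 Телевизор / медиаприставка", "tv"), by simp [pvVdTab], rfl, hw⟩
      · exact ⟨("tcl", 7, "📺 Телевизор / медиаприставка", "tv"), by simp [pvVdTab], rfl, hw⟩
      · exact ⟨("hisense", 7, "📺 Телевизор / медиаприставка", "tv"), by simp [pvVdTab], rfl, hw⟩
      · exact ⟨("shiyuan", 7, "📺 Телевизор / медиаприставка", "tv"), by simp [pvVdTab], rfl, hw⟩
    · rcases hw with hw|hw|hw|hw|hw
      · exact ⟨("lenovo", 9, "💻 Компьютер / ноутбук", "computer"), by simp [pvVdTab], rfl, hw⟩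
      · exact ⟨("dell", 9, "💻 Компьютер / ноутбук", "computer"), by simp [pvVdTab], rfl, hw⟩
      · exact ⟨("acer", 9, "💻 Компьютер / ноутбук", "computer"), by simp [pvVdTab], rfl, hw⟩
      · exact ⟨("msi", 9, "💻 Компьютер / ноутбук", "computer"), by simp [pvVdTab], rfl, hw⟩
      · exact ⟨("intel", 9, "💻 Компьютер / ноутбук", "computer"), by simp [pvVdTab], rfl, hw⟩

-- ===== VERDICT (by name: the statement is the Claim_ definition above) =====
set_option maxHeartbeats 2000000 in
theorem guess_device_spec : Claim_equal_guess_device := by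
  intro hostname vendor ip gateway_ips _
  unfold Spec_guess_device
  simp only [guess_device, guess_device_alt]
  by_cases hgw : gateway_ips.contains ip = true
  · rw [if_pos hgw, if_pos hgw]
  · rw [if_neg hgw, if_neg hgw]
    rw [pv_scan_eq_hits pvVdTab, pv_scan_eq_hits pvHnTab]
    rw [pv_foldl_cano_none _ (pv_hits_cano pvHnTab pv_hn_cano _)]
    rw [pv_foldl_cano _ _ (pv_hits_cano pvVdTab pv_vd_cano _)]
    rw [← List.foldl_append, pv_foldl_pmin_none]
    simp only [List.any_cons, List.any_nil, Bool.or_false, Bool.or_eq_true, PySem.Str.isIn_iff_infix]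
    by_cases h0 : ("tp-link".toList <:+: (PySem.Str.lower vendor).toList ∨ "d-link".toList <:+: (PySem.Str.lower vendor).toList ∨ "asus".toList <:+: (PySem.Str.lower vendor).toList ∨ "mikrotik".toList <:+: (PySem.Str.lower vendor).toList ∨ "cisco".toList <:+: (PySem.Str.lower vendor).toList ∨ "ubiquiti".toList <:+: (PySem.Str.lower vendor).toList ∨ "huawei".toList <:+: (PySem.Str.lower vendor).toList)
    · rw [if_pos h0]
      have hmin : (((pvHits pvHnTab (PySem.Str.lower hostname).toList).map Prod.fst ++ (pvHits pvVdTab (PySem.Str.lower vendor).toList).map Prod.fst)).min? = some 0 := by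
        rw [List.min?_eq_some_iff_subtype]
        constructor
        · rw [List.mem_append, pv_mem_priosH, pv_mem_priosV]
          exact Or.inr (Or.inl (⟨rfl, h0⟩))
        · intro b hb
          rw [List.mem_append, pv_mem_priosH, pv_mem_priosV] at hb
          rcases hb with (⟨rfl,hC⟩|⟨rfl,hC⟩|⟨rfl,hC⟩|⟨rfl,hC⟩|⟨rfl,hC⟩|⟨rfl,hC⟩)|(⟨rfl,hC⟩|⟨rfl,hC⟩|⟨rfl,hC⟩|⟨rfl,hC⟩|⟨rfl,hC⟩)
          · omega
          · omega
          · omega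
          · omega
          · omega
          · omega
          · omega
          · omega
          · omega
          · omega
          · omega
      rw [hmin]
      simp [pvCano, pvRes]
    rw [if_neg h0]
    by_cases h1 : ("hp".toList <:+: (PySem.Str.lower vendor).toList ∨ "brother".toList <:+: (PySem.Str.lower vendor).toList ∨ "epson".toList <:+: (PySem.Str.lower vendor).toList ∨ "canon".toList <:+: (PySem.Str.lower vendor).toList ∨ "kyocera".toList <:+: (PySem.Str.lower vendor).toList ∨ "xerox".toList <:+: (PySem.Str.lower vendor).toList ∨ "lexmark".toList <:+: (PySem.Str.lower vendor).toList)
    · rw [if_pos h1]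
      have hmin : (((pvHits pvHnTab (PySem.Str.lower hostname).toList).map Prod.fst ++ (pvHits pvVdTab (PySem.Str.lower vendor).toList).map Prod.fst)).min? = some 1 := by
        rw [List.min?_eq_some_iff_subtype]
        constructor
        · rw [List.mem_append, pv_mem_priosH, pv_mem_priosV]
          exact Or.inr (Or.inr (Or.inl (⟨rfl, h1⟩)))
        · intro b hb
          rw [List.mem_append, pv_mem_priosH, pv_mem_priosV] at hb
          rcases hb with (⟨rfl,hC⟩|⟨rfl,hC⟩|⟨rfl,hC⟩|⟨rfl,hC⟩|⟨rfl,hC⟩|⟨rfl,hC⟩)|(⟨rfl,hC⟩|⟨rfl,hC⟩|⟨rfl,hC⟩|⟨rfl,hC⟩|⟨rfl,hC⟩)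
          · omega
          · omega
          · omega
          · omega
          · omega
          · omega
          · exact absurd hC h0
          · omega
          · omega
          · omega
          · omega
      rw [hmin]
      simp [pvCano, pvRes]
    rw [if_neg h1]
    by_cases h2 : ("iphone".toList <:+: (PySem.Str.lower hostname).toList ∨ "ipad".toList <:+: (PySem.Str.lower hostname).toList ∨ "macbook".toList <:+: (PySem.Str.lower hostname).toList ∨ "imac".toList <:+: (PySem.Str.lower hostname).toList ∨ "apple-tv".toList <:+: (PySem.Str.lower hostname).toList)
    · rw [if_pos h2]
      have hmin : (((pvHits pvHnTab (PySem.Str.lower hostname).toList).map Prod.fst ++ (pvHits pvVdTab (PySem.Str.lower vendor).toList).map Prod.fst)).min? = some 2 := by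
        rw [List.min?_eq_some_iff_subtype]
        constructor
        · rw [List.mem_append, pv_mem_priosH, pv_mem_priosV]
          exact Or.inl (Or.inl (⟨rfl, h2⟩))
        · intro b hb
          rw [List.mem_append, pv_mem_priosH, pv_mem_priosV] at hb
          rcases hb with (⟨rfl,hC⟩|⟨rfl,hC⟩|⟨rfl,hC⟩|⟨rfl,hC⟩|⟨rfl,hC⟩|⟨rfl,hC⟩)|(⟨rfl,hC⟩|⟨rfl,hC⟩|⟨rfl,hC⟩|⟨rfl,hC⟩|⟨rfl,hC⟩)
          · omega
          · omega
          · omega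
          · omega
          · omega
          · omega
          · exact absurd hC h0
          · exact absurd hC h1
          · omega
          · omega
          · omega
      rw [hmin]
      simp [pvCano, pvRes]
    rw [if_neg h2]
    by_cases h3 : ("apple".toList <:+: (PySem.Str.lower vendor).toList)
    · rw [if_pos h3]
      have hmin : (((pvHits pvHnTab (PySem.Str.lower hostname).toList).map Prod.fst ++ (pvHits pvVdTab (PySem.Str.lower vendor).toList).map Prod.fst)).min? = some 3 := by
        rw [List.min?_eq_some_iff_subtype]
        constructor
        · rw [List.mem_append, pv_mem_priosH, pv_mem_priosV]
          exact Or.inr (Or.inr (Or.inr (Or.inl (⟨rfl, h3⟩))))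
        · intro b hb
          rw [List.mem_append, pv_mem_priosH, pv_mem_priosV] at hb
          rcases hb with (⟨rfl,hC⟩|⟨rfl,hC⟩|⟨rfl,hC⟩|⟨rfl,hC⟩|⟨rfl,hC⟩|⟨rfl,hC⟩)|(⟨rfl,hC⟩|⟨rfl,hC⟩|⟨rfl,hC⟩|⟨rfl,hC⟩|⟨rfl,hC⟩)
          · exact absurd hC h2
          · omega
          · omega
          · omega
          · omega
          · omega
          · exact absurd hC h0
          · exact absurd hC h1
          · omega
          · omega
          · omega
      rw [hmin]
      simp [pvCano, pvRes]
    rw [if_neg h3]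
    by_cases h4 : ("yandex".toList <:+: (PySem.Str.lower hostname).toList ∨ "alice".toList <:+: (PySem.Str.lower hostname).toList ∨ "yndx".toList <:+: (PySem.Str.lower hostname).toList ∨ "станция".toList <:+: (PySem.Str.lower hostname).toList ∨ "station".toList <:+: (PySem.Str.lower hostname).toList)
    · rw [if_pos h4]
      have hmin : (((pvHits pvHnTab (PySem.Str.lower hostname).toList).map Prod.fst ++ (pvHits pvVdTab (PySem.Str.lower vendor).toList).map Prod.fst)).min? = some 4 := by
        rw [List.min?_eq_some_iff_subtype]
        constructor
        · rw [List.mem_append, pv_mem_priosH, pv_mem_priosV]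
          exact Or.inl (Or.inr (Or.inl (⟨rfl, h4⟩)))
        · intro b hb
          rw [List.mem_append, pv_mem_priosH, pv_mem_priosV] at hb
          rcases hb with (⟨rfl,hC⟩|⟨rfl,hC⟩|⟨rfl,hC⟩|⟨rfl,hC⟩|⟨rfl,hC⟩|⟨rfl,hC⟩)|(⟨rfl,hC⟩|⟨rfl,hC⟩|⟨rfl,hC⟩|⟨rfl,hC⟩|⟨rfl,hC⟩)
          · exact absurd hC h2
          · omega
          · omega
          · omega
          · omega
          · omega
          · exact absurd hC h0
          · exact absurd hC h1
          · exact absurd hC h3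
          · omega
          · omega
      rw [hmin]
      simp [pvCano, pvRes]
    rw [if_neg h4]
    by_cases h5 : ("sber".toList <:+: (PySem.Str.lower hostname).toList ∨ "salute".toList <:+: (PySem.Str.lower hostname).toList ∨ "салют".toList <:+: (PySem.Str.lower hostname).toList)
    · rw [if_pos h5]
      have hmin : (((pvHits pvHnTab (PySem.Str.lower hostname).toList).map Prod.fst ++ (pvHits pvVdTab (PySem.Str.lower vendor).toList).map Prod.fst)).min? = some 5 := by
        rw [List.min?_eq_some_iff_subtype]
        constructor
        · rw [List.mem_append, pv_mem_priosH, pv_mem_priosV]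
          exact Or.inl (Or.inr (Or.inr (Or.inl (⟨rfl, h5⟩))))
        · intro b hb
          rw [List.mem_append, pv_mem_priosH, pv_mem_priosV] at hb
          rcases hb with (⟨rfl,hC⟩|⟨rfl,hC⟩|⟨rfl,hC⟩|⟨rfl,hC⟩|⟨rfl,hC⟩|⟨rfl,hC⟩)|(⟨rfl,hC⟩|⟨rfl,hC⟩|⟨rfl,hC⟩|⟨rfl,hC⟩|⟨rfl,hC⟩)
          · exact absurd hC h2
          · exact absurd hC h4
          · omega
          · omega
          · omega
          · omega
          · exact absurd hC h0
          · exact absurd hC h1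
          · exact absurd hC h3
          · omega
          · omega
      rw [hmin]
      simp [pvCano, pvRes]
    rw [if_neg h5]
    by_cases h6 : ("tv".toList <:+: (PySem.Str.lower hostname).toList)
    · rw [if_pos (Or.inl h6)]
      have hmin : (((pvHits pvHnTab (PySem.Str.lower hostname).toList).map Prod.fst ++ (pvHits pvVdTab (PySem.Str.lower vendor).toList).map Prod.fst)).min? = some 6 := by
        rw [List.min?_eq_some_iff_subtype]
        constructor
        · rw [List.mem_append, pv_mem_priosH, pv_mem_priosV]
          exact Or.inl (Or.inr (Or.inr (Or.inr (Or.inl (⟨rfl, h6⟩)))))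
        · intro b hb
          rw [List.mem_append, pv_mem_priosH, pv_mem_priosV] at hb
          rcases hb with (⟨rfl,hC⟩|⟨rfl,hC⟩|⟨rfl,hC⟩|⟨rfl,hC⟩|⟨rfl,hC⟩|⟨rfl,hC⟩)|(⟨rfl,hC⟩|⟨rfl,hC⟩|⟨rfl,hC⟩|⟨rfl,hC⟩|⟨rfl,hC⟩)
          · exact absurd hC h2
          · exact absurd hC h4
          · exact absurd hC h5
          · omega
          · omega
          · omega
          · exact absurd hC h0
          · exact absurd hC h1
          · exact absurd hC h3
          · omega
          · omega
      rw [hmin]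
      simp [pvCano, pvRes]
    by_cases h7 : ("lg".toList <:+: (PySem.Str.lower vendor).toList ∨ "samsung".toList <:+: (PySem.Str.lower vendor).toList ∨ "sony".toList <:+: (PySem.Str.lower vendor).toList ∨ "philips".toList <:+: (PySem.Str.lower vendor).toList ∨ "tcl".toList <:+: (PySem.Str.lower vendor).toList ∨ "hisense".toList <:+: (PySem.Str.lower vendor).toList ∨ "shiyuan".toList <:+: (PySem.Str.lower vendor).toList)
    · rw [if_pos (Or.inr h7)]
      have hmin : (((pvHits pvHnTab (PySem.Str.lower hostname).toList).map Prod.fst ++ (pvHits pvVdTab (PySem.Str.lower vendor).toList).map Prod.fst)).min? = some 7 := by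
        rw [List.min?_eq_some_iff_subtype]
        constructor
        · rw [List.mem_append, pv_mem_priosH, pv_mem_priosV]
          exact Or.inr (Or.inr (Or.inr (Or.inr (Or.inl (⟨rfl, h7⟩)))))
        · intro b hb
          rw [List.mem_append, pv_mem_priosH, pv_mem_priosV] at hb
          rcases hb with (⟨rfl,hC⟩|⟨rfl,hC⟩|⟨rfl,hC⟩|⟨rfl,hC⟩|⟨rfl,hC⟩|⟨rfl,hC⟩)|(⟨rfl,hC⟩|⟨rfl,hC⟩|⟨rfl,hC⟩|⟨rfl,hC⟩|⟨rfl,hC⟩)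
          · exact absurd hC h2
          · exact absurd hC h4
          · exact absurd hC h5
          · exact absurd hC h6
          · omega
          · omega
          · exact absurd hC h0
          · exact absurd hC h1
          · exact absurd hC h3
          · omega
          · omega
      rw [hmin]
      simp [pvCano, pvRes]
    rw [if_neg (show ¬(("tv".toList <:+: (PySem.Str.lower hostname).toList) ∨ ("lg".toList <:+: (PySem.Str.lower vendor).toList ∨ "samsung".toList <:+: (PySem.Str.lower vendor).toList ∨ "sony".toList <:+: (PySem.Str.lower vendor).toList ∨ "philips".toList <:+: (PySem.Str.lower vendor).toList ∨ "tcl".toList <:+: (PySem.Str.lower vendor).toList ∨ "hisense".toList <:+: (PySem.Str.lower vendor).toList ∨ "shiyuan".toList <:+: (PySem.Str.lower vendor).toList)) from fun h => h.elim h6 h7)]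
    by_cases h8 : ("pc".toList <:+: (PySem.Str.lower hostname).toList ∨ "desktop".toList <:+: (PySem.Str.lower hostname).toList ∨ "laptop".toList <:+: (PySem.Str.lower hostname).toList ∨ "notebook".toList <:+: (PySem.Str.lower hostname).toList)
    · rw [if_pos (Or.inl h8)]
      have hmin : (((pvHits pvHnTab (PySem.Str.lower hostname).toList).map Prod.fst ++ (pvHits pvVdTab (PySem.Str.lower vendor).toList).map Prod.fst)).min? = some 8 := by
        rw [List.min?_eq_some_iff_subtype]
        constructor
        · rw [List.mem_append, pv_mem_priosH, pv_mem_priosV]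
          exact Or.inl (Or.inr (Or.inr (Or.inr (Or.inr (Or.inl (⟨rfl, h8⟩))))))
        · intro b hb
          rw [List.mem_append, pv_mem_priosH, pv_mem_priosV] at hb
          rcases hb with (⟨rfl,hC⟩|⟨rfl,hC⟩|⟨rfl,hC⟩|⟨rfl,hC⟩|⟨rfl,hC⟩|⟨rfl,hC⟩)|(⟨rfl,hC⟩|⟨rfl,hC⟩|⟨rfl,hC⟩|⟨rfl,hC⟩|⟨rfl,hC⟩)
          · exact absurd hC h2
          · exact absurd hC h4
          · exact absurd hC h5
          · exact absurd hC h6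
          · omega
          · omega
          · exact absurd hC h0
          · exact absurd hC h1
          · exact absurd hC h3
          · exact absurd hC h7
          · omega
      rw [hmin]
      simp [pvCano, pvRes]
    by_cases h9 : ("lenovo".toList <:+: (PySem.Str.lower vendor).toList ∨ "dell".toList <:+: (PySem.Str.lower vendor).toList ∨ "asus".toList <:+: (PySem.Str.lower vendor).toList ∨ "acer".toList <:+: (PySem.Str.lower vendor).toList ∨ "msi".toList <:+: (PySem.Str.lower vendor).toList ∨ "intel".toList <:+: (PySem.Str.lower vendor).toList)
    · rw [if_pos (Or.inr h9)]
      have h9t : ("lenovo".toList <:+: (PySem.Str.lower vendor).toList ∨ "dell".toList <:+: (PySem.Str.lower vendor).toList ∨ "acer".toList <:+: (PySem.Str.lower vendor).toList ∨ "msi".toList <:+: (PySem.Str.lower vendor).toList ∨ "intel".toList <:+: (PySem.Str.lower vendor).toList) := by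
        have hasus : ¬("asus".toList <:+: (PySem.Str.lower vendor).toList) := fun hx => h0 (Or.inr (Or.inr (Or.inl hx)))
        rcases h9 with h|h|h|h|h|h
        exacts [Or.inl h, Or.inr (Or.inl h), absurd h hasus, Or.inr (Or.inr (Or.inl h)), Or.inr (Or.inr (Or.inr (Or.inl h))), Or.inr (Or.inr (Or.inr (Or.inr h)))]
      have hmin : (((pvHits pvHnTab (PySem.Str.lower hostname).toList).map Prod.fst ++ (pvHits pvVdTab (PySem.Str.lower vendor).toList).map Prod.fst)).min? = some 9 := by
        rw [List.min?_eq_some_iff_subtype]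
        constructor
        · rw [List.mem_append, pv_mem_priosH, pv_mem_priosV]
          exact Or.inr (Or.inr (Or.inr (Or.inr (Or.inr (⟨rfl, h9t⟩)))))
        · intro b hb
          rw [List.mem_append, pv_mem_priosH, pv_mem_priosV] at hb
          rcases hb with (⟨rfl,hC⟩|⟨rfl,hC⟩|⟨rfl,hC⟩|⟨rfl,hC⟩|⟨rfl,hC⟩|⟨rfl,hC⟩)|(⟨rfl,hC⟩|⟨rfl,hC⟩|⟨rfl,hC⟩|⟨rfl,hC⟩|⟨rfl,hC⟩)
          · exact absurd hC h2
          · exact absurd hC h4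
          · exact absurd hC h5
          · exact absurd hC h6
          · exact absurd hC h8
          · omega
          · exact absurd hC h0
          · exact absurd hC h1
          · exact absurd hC h3
          · exact absurd hC h7
          · omega
      rw [hmin]
      simp [pvCano, pvRes]
    rw [if_neg (show ¬(("pc".toList <:+: (PySem.Str.lower hostname).toList ∨ "desktop".toList <:+: (PySem.Str.lower hostname).toList ∨ "laptop".toList <:+: (PySem.Str.lower hostname).toList ∨ "notebook".toList <:+: (PySem.Str.lower hostname).toList) ∨ ("lenovo".toList <:+: (PySem.Str.lower vendor).toList ∨ "dell".toList <:+: (PySem.Str.lower vendor).toList ∨ "asus".toList <:+: (PySem.Str.lower vendor).toList ∨ "acer".toList <:+: (PySem.Str.lower vendor).toList ∨ "msi".toList <:+: (PySem.Str.lower vendor).toList ∨ "intel".toList <:+: (PySem.Str.lower vendor).toList)) from fun h => h.elim h8 h9)]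
    by_cases h10 : ("phone".toList <:+: (PySem.Str.lower hostname).toList ∨ "mobile".toList <:+: (PySem.Str.lower hostname).toList ∨ "android".toList <:+: (PySem.Str.lower hostname).toList)
    · rw [if_pos h10]
      have hmin : (((pvHits pvHnTab (PySem.Str.lower hostname).toList).map Prod.fst ++ (pvHits pvVdTab (PySem.Str.lower vendor).toList).map Prod.fst)).min? = some 10 := by
        rw [List.min?_eq_some_iff_subtype]
        constructor
        · rw [List.mem_append, pv_mem_priosH, pv_mem_priosV]
          exact Or.inl (Or.inr (Or.inr (Or.inr (Or.inr (Or.inr (⟨rfl, h10⟩))))))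
        · intro b hb
          rw [List.mem_append, pv_mem_priosH, pv_mem_priosV] at hb
          rcases hb with (⟨rfl,hC⟩|⟨rfl,hC⟩|⟨rfl,hC⟩|⟨rfl,hC⟩|⟨rfl,hC⟩|⟨rfl,hC⟩)|(⟨rfl,hC⟩|⟨rfl,hC⟩|⟨rfl,hC⟩|⟨rfl,hC⟩|⟨rfl,hC⟩)
          · exact absurd hC h2
          · exact absurd hC h4
          · exact absurd hC h5
          · exact absurd hC h6
          · exact absurd hC h8
          · omega
          · exact absurd hC h0
          · exact absurd hC h1
          · exact absurd hC h3
          · exact absurd hC h7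
          · exact absurd (by rcases hC with h|h|h|h|h; exacts [Or.inl h, Or.inr (Or.inl h), Or.inr (Or.inr (Or.inr (Or.inl h))), Or.inr (Or.inr (Or.inr (Or.inr (Or.inl h)))), Or.inr (Or.inr (Or.inr (Or.inr (Or.inr h))))]) h9
      rw [hmin]
      simp [pvCano, pvRes]
    rw [if_neg h10]
    have hmin : (((pvHits pvHnTab (PySem.Str.lower hostname).toList).map Prod.fst ++ (pvHits pvVdTab (PySem.Str.lower vendor).toList).map Prod.fst)).min? = none := by
      rw [List.min?_eq_none_iff, List.eq_nil_iff_forall_not_mem]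
      intro b hb
      rw [List.mem_append, pv_mem_priosH, pv_mem_priosV] at hb
      rcases hb with (⟨rfl,hC⟩|⟨rfl,hC⟩|⟨rfl,hC⟩|⟨rfl,hC⟩|⟨rfl,hC⟩|⟨rfl,hC⟩)|(⟨rfl,hC⟩|⟨rfl,hC⟩|⟨rfl,hC⟩|⟨rfl,hC⟩|⟨rfl,hC⟩)
      · exact absurd hC h2
      · exact absurd hC h4
      · exact absurd hC h5
      · exact absurd hC h6
      · exact absurd hC h8
      · exact absurd hC h10
      · exact absurd hC h0
      · exact absurd hC h1
      · exact absurd hC h3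
      · exact absurd hC h7
      · exact absurd (by rcases hC with h|h|h|h|h; exacts [Or.inl h, Or.inr (Or.inl h), Or.inr (Or.inr (Or.inr (Or.inl h))), Or.inr (Or.inr (Or.inr (Or.inr (Or.inl h)))), Or.inr (Or.inr (Or.inr (Or.inr (Or.inr h))))]) h9
    rw [hmin]
    rfl
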